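-- pv_equiv track=rewrite | github.com/JunYupK/Algorithm | programmers/level1/신규 아이디 추천.py | solution
-- ===== SOURCE A (Python) =====
-- def solution(new_id):
--     answer = ''
--     new_id = new_id.lower()
--     for s in new_id:
--         if s.isalnum() or s in '-_.':
--             answer += s
--     while '..' in answer:
--         answer = answer.replace('..','.')
--     answer = answer.strip('.')
--     if answer == '':
--         answer += 'a'
--     if len(answer) >= 16:
--         answer = answer[0:15]
--         if answer[14] == '.':
--             answer = answer[0:14]
--     if len(answer) <= 2:
--         tmp = answer[-1]
--         while len(answer) != 3:
--             answer += tmp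
--     return answer
-- ===== SOURCE B (Python) =====
-- def solution(new_id):
--     # single pass: filter + collapse consecutive dots while tracking the previous kept char
--     answer = ''
--     prev = ''
--     for s in new_id.lower():
--         if not (s.isalnum() or s in '-_.'):
--             continue
--         if s == '.' and prev == '.':
--             continue
--         answer += s
--         prev = s
--     answer = answer.strip('.')
--     if answer == '':
--         answer = 'a'
--     if len(answer) >= 16:
--         answer = answer[0:15]
--         if answer[14] == '.':
--             answer = answer[0:14]
--     if len(answer) <= 2:
--         answer += answer[-1] * (3 - len(answer))
--     return answer
-- ===== Notes on version B (the rewrite author's own statement) =====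
-- stated objective: simpler
-- what changed: B collapses consecutive dots inside the single filtering pass by tracking the previous kept character, instead of A's filter loop followed by a repeated `while '..' in answer: answer = answer.replace('..','.')` rescan, and replaces A's while-padding loop with string multiplication.
import Mathlib
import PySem

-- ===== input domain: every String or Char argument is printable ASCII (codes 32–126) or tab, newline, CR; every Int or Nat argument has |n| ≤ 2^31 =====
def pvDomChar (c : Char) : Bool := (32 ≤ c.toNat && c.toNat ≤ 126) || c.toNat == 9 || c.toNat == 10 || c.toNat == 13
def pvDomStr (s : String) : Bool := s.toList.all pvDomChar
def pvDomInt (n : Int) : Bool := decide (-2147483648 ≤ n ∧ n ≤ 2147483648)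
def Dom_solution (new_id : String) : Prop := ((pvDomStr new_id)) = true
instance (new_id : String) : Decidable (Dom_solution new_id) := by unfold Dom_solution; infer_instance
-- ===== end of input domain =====

-- B replaces A's repeated `while '..' in answer: replace('..','.')` rescans by collapsing dots in the
-- single filtering pass (tracking the previous kept char), and the `while`-padding loop by repetition;
-- objective: simpler. Both programs are total; the proved claim is exact equality on Dom.

-- ===== PORT A =====
-- shared char test: Python's `s.isalnum() or s in '-_.'` (both sources contain this very test)
def pvKeep (s : Char) : Bool := PySem.Chars.isalnum s || ['-', '_', '.'].contains s

-- `answer.replace('..','.')` characterised structurally (needed to prove A's while-loop terminates)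
def pvRep2 : List Char → List Char
  | [] => []
  | [c] => [c]
  | a :: b :: t => if a = '.' ∧ b = '.' then '.' :: pvRep2 t else a :: pvRep2 (b :: t)

theorem pvGo_eq (fuel : Nat) : ∀ (l acc : List Char), l.length ≤ fuel →
    PySem.Chars.replace.go ['.','.'] ['.'] fuel l acc = acc.reverse ++ pvRep2 l := by
  induction fuel with
  | zero => intro l acc h; simp at h; subst h; simp [PySem.Chars.replace.go, pvRep2]
  | succ n ih =>
    intro l acc h
    match l with
    | [] => simp [PySem.Chars.replace.go, pvRep2]
    | [c] =>
      rw [PySem.Chars.replace.go]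
      by_cases hc : c = '.' <;>
        simp [List.isPrefixOf, hc, ih [] _ (Nat.zero_le n), pvRep2]
    | a :: b :: t =>
      by_cases hab : a = '.' ∧ b = '.'
      · obtain ⟨ha, hb⟩ := hab; subst ha hb
        rw [PySem.Chars.replace.go]
        simp only [List.isPrefixOf, beq_self_eq_true, if_true, List.drop]
        rw [ih]
        · simp [pvRep2]
        · simp at h ⊢; omega
      · rw [PySem.Chars.replace.go]
        have : (['.','.'].isPrefixOf (a :: b :: t)) = false := by
          simp [List.isPrefixOf]; intro ha hb; exact hab ⟨ha.symm, hb.symm⟩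
        rw [this]
        simp only [Bool.false_eq_true, if_false]
        rw [ih]
        · simp [pvRep2, hab]
        · simp at h ⊢; omega

theorem pvReplace_eq_rep2 (cs : List Char) :
    PySem.Chars.replace cs ['.','.'] ['.'] = pvRep2 cs := by
  rw [PySem.Chars.replace]
  simp [pvGo_eq cs.length cs [] le_rfl]

theorem pvRep2_length_lt (cs : List Char) (h : ['.','.'] <:+: cs) :
    (pvRep2 cs).length < cs.length := by
  induction cs using pvRep2.induct with
  | case1 => simp at h
  | case2 c =>
    exfalso
    have := h.length_le; simp at this
  | case3 a b t hab ih =>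
    simp only [pvRep2, if_pos hab]
    have : (pvRep2 t).length ≤ t.length := by
      clear h hab ih
      induction t using pvRep2.induct with
      | case1 => simp [pvRep2]
      | case2 c => simp [pvRep2]
      | case3 a b t hab ih => simp [pvRep2, if_pos hab]; omega
      | case4 a b t hab ih => simp [pvRep2, if_neg hab] at ih ⊢; omega
    simp; omega
  | case4 a b t hab ih =>
    simp only [pvRep2, if_neg hab]
    have hbt : ['.','.'] <:+: b :: t := by
      rcases (List.infix_cons_iff.mp h) with hp | hi
      · exfalso
        rcases hp with ⟨r, hr⟩
        cases hr
        exact hab ⟨rfl, rfl⟩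
      · exact hi
    have := ih hbt
    simp at this ⊢; omega

-- A's `while '..' in answer: answer = answer.replace('..','.')`
def pvCollapse (answer : List Char) : List Char :=
  if PySem.Chars.isIn ['.','.'] answer then
    pvCollapse (PySem.Chars.replace answer ['.','.'] ['.'])
  else answer
termination_by answer.length
decreasing_by
  rw [pvReplace_eq_rep2]
  exact pvRep2_length_lt _ ((PySem.Chars.isIn_iff_infix _ _).mp (by assumption))

-- A's `while len(answer) != 3: answer += tmp`; it is only entered with len(answer) ≤ 2,
-- where `!= 3` and `< 3` coincide throughout (the guard `< 3` keeps the recursion total)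
def pvPad (answer : List Char) (tmp : Char) : List Char :=
  if answer.length < 3 then pvPad (answer ++ [tmp]) tmp else answer
termination_by 3 - answer.length
decreasing_by simp; omega

def solution (new_id : String) : String :=
  let lowered := PySem.Chars.lower new_id.toList
  let answer := lowered.foldl (fun acc s => if pvKeep s then acc ++ [s] else acc) []
  let answer := pvCollapse answer
  let answer := PySem.Chars.stripChars answer ['.']
  let answer := if answer = [] then answer ++ ['a'] else answer
  let answer :=
    if answer.length ≥ 16 then
      let answer := PySem.List.slice answer (some 0) (some 15)
      if PySem.List.pyGet? answer 14 = some '.' then PySem.List.slice answer (some 0) (some 14)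
      else answer
    else answer
  let answer :=
    if answer.length ≤ 2 then
      match PySem.List.pyGet? answer (-1) with
      | some tmp => pvPad answer tmp
      | none => answer  -- unreachable: answer is nonempty at this point
    else answer
  String.mk answer

-- ===== PORT B =====
def solution_alt (new_id : String) : String :=
  let lowered := PySem.Chars.lower new_id.toList
  -- one pass: state = (answer, prev); `continue`-shaped branches as in Source B
  let st := lowered.foldl (fun (st : List Char × List Char) s =>
      if !pvKeep s then st
      else if s == '.' && st.2 == ['.'] then st
      else (st.1 ++ [s], [s])) ([], [])
  let answer := st.1
  let answer := PySem.Chars.stripChars answer ['.']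
  let answer := if answer = [] then ['a'] else answer
  let answer :=
    if answer.length ≥ 16 then
      let answer := PySem.List.slice answer (some 0) (some 15)
      if PySem.List.pyGet? answer 14 = some '.' then PySem.List.slice answer (some 0) (some 14)
      else answer
    else answer
  let answer :=
    if answer.length ≤ 2 then
      match PySem.List.pyGet? answer (-1) with
      | some last => answer ++ PySem.List.pyRepeat [last] (3 - (answer.length : Int))
      | none => answer  -- unreachable: answer is nonempty at this point
    else answer
  String.mk answer

-- ===== PRECONDITION & SPEC =====
def Spec_solution (new_id : String) (out : String) : Prop := out = solution_alt new_id
instance (new_id : String) (out : String) : Decidable (Spec_solution new_id out) := by unfold Spec_solution; infer_instance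

-- ===== CLAIM (what is proved, stated in full; the proofs are below) =====
def Claim_equal_solution : Prop := ∀ (new_id : String), Dom_solution new_id → Spec_solution new_id (solution new_id)

-- ===== LEMMAS AND PROOFS =====

-- collapse of consecutive dots, with a flag "last emitted char was a dot"
def pvDd : Bool → List Char → List Char
  | _, [] => []
  | p, c :: t => if c = '.' then (if p then pvDd true t else '.' :: pvDd true t) else c :: pvDd false t

theorem pvDd_rep2 (cs : List Char) : ∀ p, pvDd p (pvRep2 cs) = pvDd p cs := by
  induction cs using pvRep2.induct with
  | case1 => intro p; rfl
  | case2 c => intro p; rfl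
  | case3 a b t hab ih =>
    obtain ⟨ha, hb⟩ := hab; subst ha hb
    intro p
    simp only [pvRep2, if_pos (⟨rfl, rfl⟩ : ('.' : Char) = '.' ∧ ('.' : Char) = '.')]
    by_cases hp : p <;> simp [pvDd, hp, ih]
  | case4 a b t hab ih =>
    intro p
    simp only [pvRep2, if_neg hab]
    by_cases ha : a = '.' <;> by_cases hp : p <;> simp [pvDd, ha, hp, ih]

theorem pvDd_false_of_no (cs : List Char) (h : ¬ ['.','.'] <:+: cs) : pvDd false cs = cs := by
  induction cs with
  | nil => rfl
  | cons c t ih =>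
    have ht : ¬ ['.','.'] <:+: t := fun hh => h (List.infix_cons hh)
    by_cases hc : c = '.'
    · subst hc
      have hdd : pvDd true t = pvDd false t := by
        cases t with
        | nil => rfl
        | cons x t' =>
          have hx : x ≠ '.' := by
            rintro rfl
            refine h ⟨[], t', ?_⟩; rfl
          simp [pvDd, hx]
      simp [pvDd, hdd, ih ht]
    · simp [pvDd, hc, ih ht]

theorem pvCollapse_eq_dd (cs : List Char) : pvCollapse cs = pvDd false cs := by
  induction cs using pvCollapse.induct with
  | case1 cs h ih =>
    rw [pvCollapse, if_pos h, ih, pvReplace_eq_rep2, pvDd_rep2]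
  | case2 cs h =>
    rw [pvCollapse, if_neg h, pvDd_false_of_no]
    intro hi
    exact h ((PySem.Chars.isIn_iff_infix _ _).mpr hi)

-- B's single pass computes the filtered, dot-collapsed list
theorem pvFoldB_eq (cs : List Char) : ∀ (acc prev : List Char),
    (cs.foldl (fun (st : List Char × List Char) s =>
      if !pvKeep s then st
      else if s == '.' && st.2 == ['.'] then st
      else (st.1 ++ [s], [s])) (acc, prev)).1
    = acc ++ pvDd (prev == ['.']) (cs.filter pvKeep) := by
  induction cs with
  | nil => intro acc prev; simp [pvDd]
  | cons c t ih =>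
    intro acc prev
    rw [List.foldl_cons]
    by_cases hk : pvKeep c
    · by_cases hc : c = '.'
      · subst hc
        by_cases hp : prev = ['.']
        · have hstep : (if !pvKeep '.' then (acc, prev)
              else if ('.' : Char) == '.' && prev == ['.'] then (acc, prev)
              else (acc ++ ['.'], ['.'])) = (acc, prev) := by
            simp [hk, hp]
          rw [hstep, ih, List.filter_cons_of_pos hk]
          simp [pvDd, hp]
        · have hstep : (if !pvKeep '.' then (acc, prev)
              else if ('.' : Char) == '.' && prev == ['.'] then (acc, prev)
              else (acc ++ ['.'], ['.'])) = (acc ++ ['.'], ['.']) := by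
            simp [hk, hp]
          rw [hstep, ih, List.filter_cons_of_pos hk]
          simp [pvDd, hp]
      · have hstep : (if !pvKeep c then (acc, prev)
            else if c == '.' && prev == ['.'] then (acc, prev)
            else (acc ++ [c], [c])) = (acc ++ [c], [c]) := by
          simp [hk, hc]
        rw [hstep, ih, List.filter_cons_of_pos hk]
        have hcb : (c == '.') = false := by simp [hc]
        simp [pvDd, hc, hcb]
    · have hstep : (if !pvKeep c then (acc, prev)
          else if c == '.' && prev == ['.'] then (acc, prev)
          else (acc ++ [c], [c])) = (acc, prev) := by
        simp [hk]
      rw [hstep, ih, List.filter_cons_of_neg hk]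

-- the two padding branches agree on any nonempty list
theorem pvPad_eq (ans : List Char) (h : ans ≠ []) :
    (if ans.length ≤ 2 then
      match PySem.List.pyGet? ans (-1) with
      | some tmp => pvPad ans tmp
      | none => ans
    else ans)
    = (if ans.length ≤ 2 then
      match PySem.List.pyGet? ans (-1) with
      | some last => ans ++ PySem.List.pyRepeat [last] (3 - (ans.length : Int))
      | none => ans
    else ans) := by
  by_cases hl : ans.length ≤ 2
  · match ans, h with
    | [a], _ =>
      simp [PySem.List.pyGet?, PySem.List.pyIdx?, PySem.List.pyRepeat]
      rw [pvPad, if_pos (by simp), pvPad, if_pos (by simp), pvPad, if_neg (by simp)]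
      simp [PySem.List.pyRepeat]
    | [a, b], _ =>
      simp [PySem.List.pyGet?, PySem.List.pyIdx?, PySem.List.pyRepeat]
      rw [pvPad, if_pos (by simp), pvPad, if_neg (by simp)]
      simp [PySem.List.pyRepeat]
    | a :: b :: c :: t, _ => simp at hl
  · simp [hl]

-- ===== VERDICT (by name: the statement is the Claim_ definition above) =====
set_option maxHeartbeats 1600000 in
theorem solution_spec : Claim_equal_solution := by
  intro new_id _
  unfold Spec_solution solution solution_alt
  simp only []
  rw [PySem.List.foldl_append_if_eq_filter, pvFoldB_eq, pvCollapse_eq_dd]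
  simp only [List.nil_append, show (([] : List Char) == ['.']) = false from rfl]
  have hEF : ∀ x : List Char, (if x = [] then x ++ ['a'] else x) = (if x = [] then ['a'] else x) := by
    intro x; split_ifs with h
    · rw [h]; rfl
    · rfl
  rw [hEF]
  set x := PySem.Chars.stripChars (pvDd false (List.filter pvKeep (PySem.Chars.lower new_id.toList))) ['.'] with hx
  set e : List Char := if x = [] then ['a'] else x with he
  have hene : e ≠ [] := by
    rw [he]; split_ifs with h
    · simp
    · exact h
  have hs15 : PySem.List.slice e (some 0) (some 15) = e.take 15 := by simp [pysem]
  have hfne : (if e.length ≥ 16 then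
      (if PySem.List.pyGet? (PySem.List.slice e (some 0) (some 15)) 14 = some '.' then
        PySem.List.slice (PySem.List.slice e (some 0) (some 15)) (some 0) (some 14)
      else PySem.List.slice e (some 0) (some 15))
    else e) ≠ [] := by
    split_ifs with h16 hdot
    · rw [hs15]
      have hs14 : PySem.List.slice (e.take 15) (some 0) (some 14) = (e.take 15).take 14 := by
        simp [pysem]
      rw [hs14]
      apply List.ne_nil_of_length_pos
      simp only [List.length_take]
      omega
    · rw [hs15]
      apply List.ne_nil_of_length_pos
      simp only [List.length_take]
      omega
    · exact hene
  exact congrArg String.mk (pvPad_eq _ hfne)
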